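-- pv_equiv track=rewrite | github.com/CreatechStudio/Acceleration-Rules | migrate.py | match_rule_line
-- ===== SOURCE A (Python) =====
-- def match_rule_line(line: str, search_key: str) -> bool:
--     value = line.strip()
--     keys = [search_key, f'"{search_key}"']
--     suffixes = ['', ',extended-matching', ',extended-maching', ',no-resolve']
--
--     for key in keys:
--         for suffix in suffixes:
--             if value.endswith(f',{key}{suffix}'):
--                 return True
--     return False
-- ===== SOURCE B (Python) =====
-- def match_rule_line(line: str, search_key: str) -> bool:
--     # Parse the stripped line into comma-separated fields and compare whole
--     # trailing field groups, instead of testing string suffixes.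
--     fields = line.strip().split(',')
--     kparts = search_key.split(',')
--     m = len(kparts)
--     quoted = '"' + search_key + '"'
--
--     def hit(fs):
--         return len(fs) > m and ','.join(fs[-m:]) in (search_key, quoted)
--
--     if hit(fields):
--         return True
--     options = ('extended-matching', 'extended-maching', 'no-resolve')
--     return fields[-1] in options and hit(fields[:-1])
-- ===== Notes on version B (the rewrite author's own statement) =====
-- stated objective: alternative
-- what changed: Instead of testing the stripped line against 8 concatenated ',key+suffix' candidates with endswith in a 2x4 nested loop, B parses the line into comma-separated fields once and compares whole trailing field groups (the last len(key-fields) fields joined, optionally after dropping a recognized trailing option field) against the key and its quoted form.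
import Mathlib
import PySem

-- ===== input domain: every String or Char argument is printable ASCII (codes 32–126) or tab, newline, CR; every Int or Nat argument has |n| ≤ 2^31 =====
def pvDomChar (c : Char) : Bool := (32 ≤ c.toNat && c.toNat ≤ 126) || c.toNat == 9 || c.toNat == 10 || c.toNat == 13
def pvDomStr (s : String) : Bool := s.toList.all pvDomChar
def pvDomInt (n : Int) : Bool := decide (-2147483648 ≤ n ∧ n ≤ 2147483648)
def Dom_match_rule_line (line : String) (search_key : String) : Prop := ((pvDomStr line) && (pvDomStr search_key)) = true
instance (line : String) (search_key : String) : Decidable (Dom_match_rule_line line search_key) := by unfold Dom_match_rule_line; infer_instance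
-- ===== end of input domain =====

-- B replaces A's 2x4 nested endswith loop over concatenated key+suffix strings by PARSING the
-- stripped line into comma-separated fields and comparing whole trailing field groups
-- (alternative decomposition: field parsing instead of string-suffix tests; same cost).

-- ===== PORT A =====
def match_rule_line (line : String) (search_key : String) : Bool :=
  let value := PySem.Str.strip line
  let keys := [search_key, "\"" ++ search_key ++ "\""]
  let suffixes := ["", ",extended-matching", ",extended-maching", ",no-resolve"]
  keys.any (fun key => suffixes.any (fun suffix =>
    PySem.Str.endswith value ("," ++ key ++ suffix)))

-- ===== PORT B =====
-- ported on List Char (PySem.Chars is the definition layer for Python str)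
def match_rule_line_alt (line : String) (search_key : String) : Bool :=
  let value := PySem.Chars.strip line.toList
  let fields := PySem.Chars.splitOn value ",".toList
  let kparts := PySem.Chars.splitOn search_key.toList ",".toList
  let m := kparts.length
  let quoted := "\"".toList ++ search_key.toList ++ "\"".toList
  let hit : List (List Char) → Bool := fun fs =>
    decide (m < fs.length) &&
      (let tail := PySem.Chars.join ",".toList (PySem.List.slice fs (some (-(m : Int))) none)
       (tail == search_key.toList || tail == quoted))
  if hit fields then true
  else
    -- fields[-1]: split(',') always returns a nonempty list, so pyGet? is always `some`
    (match PySem.List.pyGet? fields (-1) with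
     | some lastf => lastf == "extended-matching".toList || lastf == "extended-maching".toList
         || lastf == "no-resolve".toList
     | none => false)
    && hit (PySem.List.slice fields none (some (-1)))

-- ===== PRECONDITION & SPEC =====
def Spec_match_rule_line (line : String) (search_key : String) (out : Bool) : Prop := out = match_rule_line_alt line search_key
instance (line : String) (search_key : String) (out : Bool) : Decidable (Spec_match_rule_line line search_key out) := by unfold Spec_match_rule_line; infer_instance

-- ===== CLAIM (what is proved, stated in full; the proofs are below) =====
def Claim_equal_match_rule_line : Prop := ∀ (line : String) (search_key : String), Dom_match_rule_line line search_key → Spec_match_rule_line line search_key (match_rule_line line search_key)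

-- ===== LEMMAS AND PROOFS =====

theorem splitOn_go_eq (c : Char) (fuel : Nat) (l cur : List Char) (acc : List (List Char))
    (h : l.length < fuel) :
    PySem.Chars.splitOn.go [c] fuel l cur acc = acc.reverse ++ List.splitOnP.go (· == c) l cur := by
  induction fuel generalizing l cur acc with
  | zero => omega
  | succ fuel ih =>
    cases l with
    | nil => simp [PySem.Chars.splitOn.go, List.splitOnP.go]
    | cons x rest =>
      simp only [PySem.Chars.splitOn.go, List.splitOnP.go, List.isPrefixOf]
      by_cases hx : c = x
      · subst hx
        simp only [beq_self_eq_true, Bool.true_and, if_true]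
        rw [ih _ _ _ (by simpa using Nat.lt_of_succ_lt_succ h)]
        simp
      · have h1 : (c == x) = false := by simp [hx]
        have h2 : (x == c) = false := by simp [Ne.symm hx]
        simp only [h1, h2, Bool.false_and, if_false, Bool.false_eq_true]
        exact ih _ _ _ (by simpa using Nat.lt_of_succ_lt_succ h)

theorem chars_splitOn_singleton (c : Char) (s : List Char) :
    PySem.Chars.splitOn s [c] = List.splitOn c s := by
  rw [PySem.Chars.splitOn, List.splitOn, List.splitOnP, splitOn_go_eq c _ _ _ _ (by omega)]
  simp

theorem intercalate_cons₂ {α : Type} (c : List α) (a b : List α) (u : List (List α)) :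
    c.intercalate (a :: b :: u) = a ++ c ++ c.intercalate (b :: u) := by
  simp [List.intercalate, List.intersperse]

theorem intercalate_append_nonempty {α : Type} (c : α) (l1 l2 : List (List α))
    (h1 : l1 ≠ []) (h2 : l2 ≠ []) :
    [c].intercalate (l1 ++ l2) = [c].intercalate l1 ++ c :: [c].intercalate l2 := by
  induction l1 with
  | nil => exact absurd rfl h1
  | cons a t ih =>
    cases t with
    | nil =>
      cases l2 with
      | nil => exact absurd rfl h2
      | cons b u => simp [List.intercalate]
    | cons a' t' =>
      rw [List.cons_append, List.cons_append, intercalate_cons₂, ← List.cons_append,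
        ih (by simp), intercalate_cons₂, List.append_assoc, List.append_assoc]
      simp

theorem hit_iff (w : List Char) (m : Nat) (fs : List (List Char))
    (hfree : ∀ l ∈ fs, ∀ x ∈ l, (x == ',') = false)
    (hm : (List.splitOn ',' w).length = m) :
    (m < fs.length ∧ [','].intercalate (fs.drop (fs.length - m)) = w) ↔
      (',' :: w) <:+ [','].intercalate fs := by
  have hm0 : 0 < m := by
    rw [← hm]; exact List.length_pos_iff.mpr (List.splitOnP_ne_nil _ _)
  constructor
  · rintro ⟨hlt, heq⟩
    have htd : fs = fs.take (fs.length - m) ++ fs.drop (fs.length - m) := (List.take_append_drop _ _).symm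
    have h1 : fs.take (fs.length - m) ≠ [] := by
      apply List.ne_nil_of_length_pos
      rw [List.length_take]; omega
    have h2 : fs.drop (fs.length - m) ≠ [] := by
      apply List.ne_nil_of_length_pos
      rw [List.length_drop]; omega
    refine ⟨[','].intercalate (fs.take (fs.length - m)), ?_⟩
    conv_rhs => rw [htd]
    rw [intercalate_append_nonempty _ _ _ h1 h2, heq]
  · rintro ⟨u, hu⟩
    have hne : fs ≠ [] := by
      rintro rfl
      simp [List.intercalate] at hu
    have hfree' : ∀ l ∈ fs, ',' ∉ l := fun l hl hmem => by
      have := hfree l hl ',' hmem; simp at this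
    have hfs : List.splitOn ',' ([','].intercalate fs) = fs :=
      List.splitOn_intercalate fs ',' hfree' hne
    rw [← hu] at hfs
    have hsp : List.splitOn ',' (u ++ ',' :: w) = List.splitOn ',' u ++ List.splitOn ',' w :=
      List.splitOnP_append_cons _ u w ',' (by simp)
    rw [hsp] at hfs
    have hu1 : 0 < (List.splitOn ',' u).length :=
      List.length_pos_iff.mpr (List.splitOnP_ne_nil _ _)
    have hlen : fs.length = (List.splitOn ',' u).length + m := by
      rw [← hfs, List.length_append, hm]
    refine ⟨by omega, ?_⟩
    have hdrop : fs.drop (fs.length - m) = List.splitOn ',' w := by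
      rw [← hfs, List.length_append, hm,
        show (List.splitOn ',' u).length + m - m = (List.splitOn ',' u).length by omega,
        List.drop_left]
    rw [hdrop, List.intercalate_splitOn]

theorem opt_iff (w opt v : List Char) (hopt : ∀ x ∈ opt, (x == ',') = false) :
    (',' :: (w ++ ',' :: opt)) <:+ v ↔
      ((List.splitOn ',' v).getLast? = some opt ∧
        (',' :: w) <:+ [','].intercalate (List.splitOn ',' v).dropLast) := by
  have hopt1 : List.splitOn ',' opt = [opt] :=
    List.splitOnP_eq_single _ _ (fun x hx => by rw [hopt x hx]; simp)
  constructor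
  · rintro ⟨u, hu⟩
    have hv : v = (u ++ ',' :: w) ++ ',' :: opt := by rw [← hu]; simp
    have hsp1 : List.splitOn ',' ((u ++ ',' :: w) ++ ',' :: opt)
        = List.splitOn ',' (u ++ ',' :: w) ++ List.splitOn ',' opt :=
      List.splitOnP_append_cons _ _ _ ',' (by simp)
    rw [hv, hsp1, hopt1]
    refine ⟨List.getLast?_concat, ?_⟩
    rw [List.dropLast_concat, List.intercalate_splitOn]
    exact ⟨u, rfl⟩
  · rintro ⟨hl, u, hu⟩
    have hnefs : List.splitOn ',' v ≠ [] := List.splitOnP_ne_nil _ _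
    have hgl : (List.splitOn ',' v).getLast hnefs = opt := by
      rw [List.getLast?_eq_some_getLast hnefs] at hl
      exact Option.some_inj.mp hl
    have hcat : (List.splitOn ',' v).dropLast ++ [opt] = List.splitOn ',' v := by
      rw [← hgl]
      exact List.dropLast_append_getLast hnefs
    have hdne : (List.splitOn ',' v).dropLast ≠ [] := by
      intro hd
      rw [hd] at hu
      simp [List.intercalate] at hu
    have hv : v = [','].intercalate ((List.splitOn ',' v).dropLast) ++ ',' :: opt := by
      conv_lhs => rw [← List.intercalate_splitOn (xs := v) ',', ← hcat]
      rw [intercalate_append_nonempty _ _ _ hdne (by simp)]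
      simp [List.intercalate]
    refine ⟨u, ?_⟩
    rw [hv, ← hu]
    simp

theorem splitOnP_pieces {α : Type} (p : α → Bool) (xs : List α) :
    ∀ l ∈ List.splitOnP p xs, ∀ x ∈ l, p x = false := by
  induction xs with
  | nil => simp [List.splitOnP_nil]
  | cons a t ih =>
    rw [List.splitOnP_cons]
    by_cases ha : p a = true
    · simp only [ha, if_true]
      intro l hl
      rcases List.mem_cons.mp hl with rfl | hl
      · simp
      · exact ih l hl
    · simp only [ha]
      cases hsp : List.splitOnP p t with
      | nil => exact absurd hsp (List.splitOnP_ne_nil p t)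
      | cons hd tl =>
        simp only [List.modifyHead]
        intro l hl
        rcases List.mem_cons.mp hl with rfl | hl
        · intro x hx
          rcases List.mem_cons.mp hx with rfl | hx
          · exact Bool.eq_false_iff.mpr ha
          · exact ih hd (by rw [hsp]; exact List.mem_cons_self) x hx
        · exact ih l (by rw [hsp]; exact List.mem_cons_of_mem _ hl)

theorem length_splitOnP {α : Type} (p : α → Bool) (xs : List α) :
    (List.splitOnP p xs).length = xs.countP p + 1 := by
  induction xs with
  | nil => simp [List.splitOnP_nil]
  | cons a t ih =>
    rw [List.splitOnP_cons]
    by_cases ha : p a = true <;> simp [ha, ih]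

theorem if_bool_or (a b : Bool) : (if a then true else b) = (a || b) := by
  cases a <;> simp

theorem pyGet?_neg_one {α : Type} (l : List α) : PySem.List.pyGet? l (-1) = l.getLast? := by
  simp [pysem]

theorem slice_neg_drop {α : Type} (l : List α) (m : Nat) (h : m ≤ l.length) (h0 : 0 < m) :
    PySem.List.slice l (some (-(m : Int))) none = l.drop (l.length - m) := by
  simp only [PySem.List.slice, PySem.List.clampIdx]
  split_ifs with h1 h2
  · omega
  · have : ((l.length : Int) + -(m : Int)).toNat = l.length - m := by omega
    rw [this]
    simp
  · omega

theorem slice_neg_one_dropLast {α : Type} (l : List α) :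
    PySem.List.slice l none (some (-1)) = l.dropLast := by
  simp [pysem]

theorem quoted_splitOn_length (k : List Char) :
    (List.splitOn ',' ('"' :: (k ++ ['"']))).length = (List.splitOn ',' k).length := by
  show (List.splitOnP _ _).length = (List.splitOnP _ _).length
  rw [length_splitOnP, length_splitOnP, List.countP_cons, List.countP_append]
  simp

theorem hitP_iff (w₁ w₂ : List Char) (m : Nat) (fs : List (List Char))
    (hfree : ∀ l ∈ fs, ∀ x ∈ l, (x == ',') = false)
    (hm1 : (List.splitOn ',' w₁).length = m) (hm2 : (List.splitOn ',' w₂).length = m) :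
    (m < fs.length ∧
      ([','].intercalate (PySem.List.slice fs (some (-(m : Int))) none) = w₁ ∨
       [','].intercalate (PySem.List.slice fs (some (-(m : Int))) none) = w₂)) ↔
      ((',' :: w₁) <:+ [','].intercalate fs ∨ (',' :: w₂) <:+ [','].intercalate fs) := by
  have hm0 : 0 < m := by
    rw [← hm1]
    exact List.length_pos_iff.mpr (List.splitOnP_ne_nil _ _)
  constructor
  · rintro ⟨hlt, h⟩
    rw [slice_neg_drop fs m (le_of_lt hlt) hm0] at h
    cases h with
    | inl h => exact Or.inl ((hit_iff w₁ m fs hfree hm1).mp ⟨hlt, h⟩)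
    | inr h => exact Or.inr ((hit_iff w₂ m fs hfree hm2).mp ⟨hlt, h⟩)
  · intro h
    cases h with
    | inl h =>
      obtain ⟨hlt, he⟩ := (hit_iff w₁ m fs hfree hm1).mpr h
      exact ⟨hlt, by rw [slice_neg_drop fs m (le_of_lt hlt) hm0]; exact Or.inl he⟩
    | inr h =>
      obtain ⟨hlt, he⟩ := (hit_iff w₂ m fs hfree hm2).mpr h
      exact ⟨hlt, by rw [slice_neg_drop fs m (le_of_lt hlt) hm0]; exact Or.inr he⟩

theorem or_shuffle (a b c d e g h : Prop) :
    (a ∨ (c ∧ g) ∨ (d ∧ g) ∨ (e ∧ g)) ∨ b ∨ (c ∧ h) ∨ (d ∧ h) ∨ (e ∧ h) ↔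
      (a ∨ b) ∨ (c ∨ d ∨ e) ∧ (g ∨ h) := by
  tauto

theorem match_last_iff (fs : List (List Char)) (o1 o2 o3 : List Char) :
    (match fs.getLast? with
      | some lastf => lastf == o1 || lastf == o2 || lastf == o3
      | none => false) = true ↔
      (fs.getLast? = some o1 ∨ fs.getLast? = some o2 ∨ fs.getLast? = some o3) := by
  cases h : fs.getLast? <;> simp [or_assoc]

-- ===== VERDICT (by name: the statement is the Claim_ definition above) =====
set_option maxRecDepth 4096 in
theorem match_rule_line_spec : Claim_equal_match_rule_line := by
  intro line sk _
  unfold Spec_match_rule_line match_rule_line match_rule_line_alt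
  simp only [List.any_cons, List.any_nil, Bool.or_false, String.append_empty, if_bool_or,
    pyGet?_neg_one, slice_neg_one_dropLast]
  rw [show ("," : String).toList = [','] from rfl]
  simp only [chars_splitOn_singleton]
  rw [Bool.eq_iff_iff]
  simp only [Bool.or_eq_true, Bool.and_eq_true, decide_eq_true_eq, beq_iff_eq,
    PySem.Str.endswith_eq, PySem.Str.toList_strip, PySem.Chars.endswith_iff,
    String.toList_append, match_last_iff, PySem.Chars.join,
    show ("," : String).toList = [','] from rfl,
    show ("\"" : String).toList = ['"'] from rfl,
    show (",extended-matching" : String).toList = ',' :: ("extended-matching" : String).toList from rfl,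
    show (",extended-maching" : String).toList = ',' :: ("extended-maching" : String).toList from rfl,
    show (",no-resolve" : String).toList = ',' :: ("no-resolve" : String).toList from rfl,
    List.cons_append, List.nil_append, List.append_assoc]
  set k := sk.toList with hk
  set v := PySem.Chars.strip line.toList with hv
  set fs := List.splitOn ',' v with hfs
  set m := (List.splitOn ',' k).length with hm
  have hfree : ∀ l ∈ fs, ∀ x ∈ l, (x == ',') = false := splitOnP_pieces _ _
  have hfree' : ∀ l ∈ fs.dropLast, ∀ x ∈ l, (x == ',') = false :=
    fun l hl => hfree l (List.mem_of_mem_dropLast hl)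
  have hq : (List.splitOn ',' ('"' :: (k ++ ['"']))).length = m := quoted_splitOn_length k
  have hvi : [','].intercalate fs = v := by rw [hfs]; exact List.intercalate_splitOn (xs := v) ','
  have h1 := hitP_iff k ('"' :: (k ++ ['"'])) m fs hfree rfl hq
  have h2 := hitP_iff k ('"' :: (k ++ ['"'])) m fs.dropLast hfree' rfl hq
  rw [hvi] at h1
  have ho1 : ∀ x ∈ ("extended-matching" : String).toList, (x == ',') = false := by
    have h : (("extended-matching" : String).toList.all (fun x => !(x == ','))) = true := by decide
    intro x hx
    simpa using List.all_eq_true.mp h x hx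
  have ho2 : ∀ x ∈ ("extended-maching" : String).toList, (x == ',') = false := by
    have h : (("extended-maching" : String).toList.all (fun x => !(x == ','))) = true := by decide
    intro x hx
    simpa using List.all_eq_true.mp h x hx
  have ho3 : ∀ x ∈ ("no-resolve" : String).toList, (x == ',') = false := by
    have h : (("no-resolve" : String).toList.all (fun x => !(x == ','))) = true := by decide
    intro x hx
    simpa using List.all_eq_true.mp h x hx
  have hA1 := opt_iff k ("extended-matching" : String).toList v ho1
  have hA2 := opt_iff k ("extended-maching" : String).toList v ho2
  have hA3 := opt_iff k ("no-resolve" : String).toList v ho3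
  have hB1 := opt_iff ('"' :: (k ++ ['"'])) ("extended-matching" : String).toList v ho1
  have hB2 := opt_iff ('"' :: (k ++ ['"'])) ("extended-maching" : String).toList v ho2
  have hB3 := opt_iff ('"' :: (k ++ ['"'])) ("no-resolve" : String).toList v ho3
  simp only [List.cons_append, List.nil_append, List.append_assoc, ← hfs] at hA1 hA2 hA3 hB1 hB2 hB3
  rw [h1, hA1, hA2, hA3, hB1, hB2, hB3, h2]
  exact or_shuffle _ _ _ _ _ _ _
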